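-- pv_equiv track=rewrite | github.com/sksmslhy/Java_Lexical_and_Syntax_Analyzer | syntax analyzer/lexical_analyzer.py | isComparison
-- ===== SOURCE A (Python) =====
-- COMPARISON = ['<', '>', '!', '=']
--
-- def isComparison(token):
--     state = ['T0', 'T1', 'T2', 'T3', 'T4', 'T5']
--     locate = state[0]
--     for value in token:
--         if locate == state[0]:
--             if value in COMPARISON[0]:
--                 locate = state[2]
--             elif value in COMPARISON[1]:
--                 locate = state[1]
--             elif value in COMPARISON[2]:
--                 locate = state[3]
--             elif value in COMPARISON[3]:
--                 locate = state[4]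
--             else:
--                 return False
--         elif locate == state[1]:
--             if value in COMPARISON[3]:
--                 locate = state[5]
--             else:
--                 return False
--         elif locate == state[2]:
--             if value in COMPARISON[3]:
--                 locate = state[5]
--             else:
--                 return False
--         elif locate == state[3]:
--             if value in COMPARISON[3]:
--                 locate = state[5]
--             else:
--                 return False
--         elif locate == state[4]:
--             if value in COMPARISON[3]:
--                 locate = state[5]
--             else:
--                 return False
--         else:
--             return False
--     if locate == state[1] or locate == state[2] or locate == state[5]:
--         return True
--     else:
--         return False
-- ===== SOURCE B (Python) =====
-- def isComparison(token):
--     # closed-form: the DFA accepts exactly these six operator strings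
--     return token in ('<', '>', '<=', '>=', '==', '!=')
-- ===== Notes on version B (the rewrite author's own statement) =====
-- stated objective: simpler
-- what changed: Replaced the six-state DFA character loop with a single membership test against the finite set of the six accepted operator strings.
import Mathlib
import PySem

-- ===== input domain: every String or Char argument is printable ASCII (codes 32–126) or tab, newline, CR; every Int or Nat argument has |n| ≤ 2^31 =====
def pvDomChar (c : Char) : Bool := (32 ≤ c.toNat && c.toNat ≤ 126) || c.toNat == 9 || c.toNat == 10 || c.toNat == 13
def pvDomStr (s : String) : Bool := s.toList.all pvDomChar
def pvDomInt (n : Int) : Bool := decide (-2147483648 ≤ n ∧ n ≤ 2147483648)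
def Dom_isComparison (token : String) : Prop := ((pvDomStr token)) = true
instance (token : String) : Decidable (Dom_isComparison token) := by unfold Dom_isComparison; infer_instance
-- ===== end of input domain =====

-- B replaces A's six-state DFA loop with one membership test in the six accepted
-- operator strings; equal return value on every string (objective: simpler).

-- ===== PORT A =====
-- the DFA loop: `locate` is the state string, early `return False` = returning false
def isCompGo (l : List Char) (locate : String) : Bool :=
  match l with
  | [] => locate == "T1" || locate == "T2" || locate == "T5"
  | value :: rest =>
    if locate == "T0" then
      if value == '<' then isCompGo rest "T2"
      else if value == '>' then isCompGo rest "T1"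
      else if value == '!' then isCompGo rest "T3"
      else if value == '=' then isCompGo rest "T4"
      else false
    else if locate == "T1" then
      if value == '=' then isCompGo rest "T5" else false
    else if locate == "T2" then
      if value == '=' then isCompGo rest "T5" else false
    else if locate == "T3" then
      if value == '=' then isCompGo rest "T5" else false
    else if locate == "T4" then
      if value == '=' then isCompGo rest "T5" else false
    else false

def isComparison (token : String) : Bool :=
  isCompGo token.toList "T0"

-- ===== PORT B =====
def isComparison_alt (token : String) : Bool :=
  ["<", ">", "<=", ">=", "==", "!="].contains token

-- ===== PRECONDITION & SPEC =====
def Spec_isComparison (token : String) (out : Bool) : Prop := out = isComparison_alt token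
instance (token : String) (out : Bool) : Decidable (Spec_isComparison token out) := by unfold Spec_isComparison; infer_instance

-- ===== CLAIM (what is proved, stated in full; the proofs are below) =====
def Claim_equal_isComparison : Prop := ∀ (token : String), Dom_isComparison token → Spec_isComparison token (isComparison token)

-- ===== LEMMAS AND PROOFS =====

-- string equality in terms of character lists
theorem str_eq_iff_toList (s t : String) : (s = t) ↔ s.toList = t.toList :=
  ⟨fun h => h ▸ rfl, fun h => String.ext (by simpa using h)⟩

-- after reading one of the four first characters, only "=" (then end) is accepted
theorem isCompGo_tail (l : List Char) (st : String)
    (h : st = "T1" ∨ st = "T2" ∨ st = "T3" ∨ st = "T4") :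
    isCompGo l st = (l == [] && (st == "T1" || st == "T2") || l == ['=']) := by
  rcases h with h | h | h | h <;> subst h <;>
    rcases l with _ | ⟨c, _ | ⟨d, rest⟩⟩ <;>
    simp [isCompGo] <;> by_cases hc : c = '=' <;> simp [hc, isCompGo]

theorem isCompGo_T0 (l : List Char) :
    isCompGo l "T0" =
      (l == ['<'] || l == ['>'] || l == ['<','='] || l == ['>','='] ||
       l == ['=','='] || l == ['!','=']) := by
  rcases l with _ | ⟨c, rest⟩
  · simp [isCompGo]
  · by_cases h1 : c = '<'
    · subst h1; simp [isCompGo, isCompGo_tail rest "T2" (by simp)]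
    · by_cases h2 : c = '>'
      · subst h2; simp [isCompGo, isCompGo_tail rest "T1" (by simp), h1]
      · by_cases h3 : c = '!'
        · subst h3; simp [isCompGo, isCompGo_tail rest "T3" (by simp), h1, h2]
        · by_cases h4 : c = '='
          · subst h4; simp [isCompGo, isCompGo_tail rest "T4" (by simp), h1, h2, h3]
          · simp [isCompGo, h1, h2, h3, h4]

-- ===== VERDICT (by name: the statement is the Claim_ definition above) =====
theorem isComparison_spec : Claim_equal_isComparison := by
  intro token _
  show isComparison token = isComparison_alt token
  rw [isComparison, isComparison_alt, isCompGo_T0]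
  simp [str_eq_iff_toList, Bool.or_assoc, beq_eq_decide]
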